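-- pv_equiv track=rewrite | github.com/DEEPAK-RAMGIRI/Python | Arrays/Pair Sum in a Sorted and Rotated Array.py | general
-- ===== SOURCE A (Python) =====
-- def general(arr,target):
--     #Time Complexcity = o(n log n)
--     arr.sort()
--     left =0
--     right = len(arr) -1
--     while left < right:
--         if arr[left] + arr [right] == target:
--             return [arr[left],arr[right]]
--         elif arr[left] + arr[right] > target:
--             right-=1
--         else:
--             left +=1
-- ===== SOURCE B (Python) =====
-- def general(arr, target):
--     # Counting-dict scan: the smallest value that has a partner summing to target
--     # is the answer, found without sorting.  (arr is not mutated.)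
--     counts = {}
--     for v in arr:
--         counts[v] = counts.get(v, 0) + 1
--     best = None
--     for x in counts:
--         y = target - x
--         if y in counts and (x < y or (x == y and counts[x] > 1)):
--             if best is None or x < best:
--                 best = x
--     if best is not None:
--         return [best, target - best]
-- ===== Notes on version B (the rewrite author's own statement) =====
-- stated objective: alternative
-- what changed: Replaces sort + two-pointer scan by a counting-dict single pass that returns the smallest value having a complement summing to target; no sorting, and arr is not mutated (A sorts it in place).
import Mathlib
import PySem

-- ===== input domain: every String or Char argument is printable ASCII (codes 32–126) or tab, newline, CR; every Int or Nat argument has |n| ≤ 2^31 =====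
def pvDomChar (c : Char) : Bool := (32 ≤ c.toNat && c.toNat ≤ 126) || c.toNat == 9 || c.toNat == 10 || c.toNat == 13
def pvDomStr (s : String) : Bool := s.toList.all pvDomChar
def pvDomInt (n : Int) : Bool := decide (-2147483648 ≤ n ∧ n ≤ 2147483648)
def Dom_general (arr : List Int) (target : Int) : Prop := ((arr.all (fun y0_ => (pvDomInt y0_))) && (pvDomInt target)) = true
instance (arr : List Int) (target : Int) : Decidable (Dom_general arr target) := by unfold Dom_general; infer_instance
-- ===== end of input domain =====

-- B replaces A's sort + two-pointer scan by a counting-dict pass that returns the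
-- smallest value having a complement summing to target.  A sorts arr IN PLACE (observable
-- mutation), B does not; the equivalence proved here is about the RETURN value only.

-- ===== PORT A =====
-- the while loop; left/right are Python ints.  The loop only ever reads indices with
-- 0 ≤ left < right < len(s), where pyGetD with any default is exact (= s[i]).
def generalLoop (s : List Int) (target : Int) (left right : Int) : Option (List Int) :=
  if h : left < right then
    if PySem.List.pyGetD s left 0 + PySem.List.pyGetD s right 0 = target then
      some [PySem.List.pyGetD s left 0, PySem.List.pyGetD s right 0]
    else if PySem.List.pyGetD s left 0 + PySem.List.pyGetD s right 0 > target then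
      generalLoop s target left (right - 1)
    else
      generalLoop s target (left + 1) right
  else none
termination_by (right - left).toNat
decreasing_by all_goals omega

def general (arr : List Int) (target : Int) : Option (List Int) :=
  let s := PySem.List.sorted arr (fun x => x) false   -- arr.sort()
  generalLoop s target 0 ((s.length : Int) - 1)

-- ===== PORT B =====
-- 'if best is None or x < best: best = x'
def bUpd (best : Option Int) (x : Int) : Option Int :=
  match best with
  | none => some x
  | some b => if x < b then some x else some b

-- the body of B's scan over the dict's keys
def bStep (counts : PySem.Dict Int Int) (target : Int) (best : Option Int) (x : Int) : Option Int :=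
  if counts.contains (target - x) ∧ (x < target - x ∨ (x = target - x ∧ 1 < counts.getD x 0)) then
    bUpd best x
  else best

def general_alt (arr : List Int) (target : Int) : Option (List Int) :=
  let counts := List.foldl (fun d v => d.insert v (d.getD v 0 + 1)) PySem.Dict.empty arr
  match counts.keys.foldl (bStep counts target) none with
  | some b => some [b, target - b]
  | none => none

-- ===== PRECONDITION & SPEC =====
def Spec_general (arr : List Int) (target : Int) (out : Option (List Int)) : Prop := out = general_alt arr target
instance (arr : List Int) (target : Int) (out : Option (List Int)) : Decidable (Spec_general arr target out) := by unfold Spec_general; infer_instance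

-- ===== CLAIM (what is proved, stated in full; the proofs are below) =====
def Claim_equal_general : Prop := ∀ (arr : List Int) (target : Int), Dom_general arr target → Spec_general arr target (general arr target)

-- ===== LEMMAS AND PROOFS =====

-- x is the smaller member of a pair of distinct positions of l summing to t
def Cand (l : List Int) (t x : Int) : Prop :=
  (t - x) ∈ l ∧ (x < t - x ∨ (x = t - x ∧ 2 ≤ l.count x))

theorem cand_perm {l l' : List Int} (h : l.Perm l') (t x : Int) : Cand l t x ↔ Cand l' t x := by
  unfold Cand; rw [h.mem_iff, h.count_eq]

theorem pairwise_mono (s : List Int) (hs : List.Pairwise (· ≤ ·) s) {i j : Nat}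
    (hij : i ≤ j) (hj : j < s.length) : s[i]'(by omega) ≤ s[j] := by
  rcases Nat.lt_or_eq_of_le hij with h | h
  · exact List.pairwise_iff_getElem.mp hs i j (by omega) hj h
  · subst h; exact le_refl _

theorem cand_pair (s : List Int) (t m : Int) (hs : List.Pairwise (· ≤ ·) s)
    (hm : m ∈ s) (hc : Cand s t m) :
    ∃ (i j : Nat) (_hi : i < s.length) (_hj : j < s.length),
      i < j ∧ s[i]'(by omega) = m ∧ s[j]'(by omega) = t - m := by
  rcases hc with ⟨hmem, hlt | ⟨heq, hcnt⟩⟩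
  · obtain ⟨i, hi, hsi⟩ := List.mem_iff_getElem.mp hm
    obtain ⟨j, hj, hsj⟩ := List.mem_iff_getElem.mp hmem
    refine ⟨i, j, hi, hj, ?_, hsi, hsj⟩
    by_contra hij
    push_neg at hij
    have := pairwise_mono s hs hij hi
    omega
  · have hd : List.Duplicate m s := List.duplicate_iff_two_le_count.mpr hcnt
    obtain ⟨n, nn, hlt', h1, h2⟩ := List.duplicate_iff_exists_distinct_get.mp hd
    refine ⟨n, nn, n.isLt, nn.isLt, hlt', ?_, ?_⟩
    · simpa [List.get_eq_getElem] using h1.symm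
    · have : s[(nn : Nat)]'(nn.isLt) = m := by simpa [List.get_eq_getElem] using h2.symm
      omega

theorem pair_cand (s : List Int) (t : Int) (hs : List.Pairwise (· ≤ ·) s) {i j : Nat}
    (hi : i < s.length) (hj : j < s.length) (hij : i < j)
    (hsum : s[i] + s[j] = t) : Cand s t (s[i]) := by
  have hle := pairwise_mono s hs (le_of_lt hij) hj
  constructor
  · have : t - s[i] = s[j] := by omega
    rw [this]; exact List.getElem_mem hj
  · rcases lt_or_eq_of_le hle with h | h
    · left; omega
    · right
      refine ⟨by omega, ?_⟩
      apply List.duplicate_iff_two_le_count.mp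
      apply List.duplicate_iff_exists_distinct_get.mpr
      exact ⟨⟨i, hi⟩, ⟨j, hj⟩, hij, by simp [List.get_eq_getElem], by simp [List.get_eq_getElem, h]⟩

theorem loop_some (s : List Int) (t m : Int) (hs : List.Pairwise (· ≤ ·) s)
    (hm : m ∈ s) (hc : Cand s t m) (hleast : ∀ x ∈ s, Cand s t x → m ≤ x) :
    ∀ (k : Nat) (left right : Int), (right - left).toNat = k → 0 ≤ left →
      right < (s.length : Int) →
      (∀ (i j : Nat) (hi : i < s.length) (hj : j < s.length), i < j → s[i] + s[j] = t →
        left ≤ (i : Int) ∧ (j : Int) ≤ right) →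
      generalLoop s t left right = some [m, t - m] := by
  intro k
  induction k using Nat.strong_induction_on with
  | _ k ih =>
  intro left right hk h0 hrlen hinv
  obtain ⟨i, j, hi, hj, hij, hsi, hsj⟩ := cand_pair s t m hs hm hc
  have hsum : s[i] + s[j] = t := by rw [hsi, hsj]; ring
  obtain ⟨hli, hjr⟩ := hinv i j hi hj hij hsum
  have hlr : left < right := by omega
  have hr0 : (0 : Int) ≤ right := by omega
  have hLlen : left < (s.length : Int) := by omega
  have hLlt : left.toNat < s.length := by omega
  have hRlt : right.toNat < s.length := by omega
  have egetL : PySem.List.pyGetD s left 0 = s[left.toNat] :=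
    PySem.List.pyGetD_eq_getElem s 0 h0 hLlen
  have egetR : PySem.List.pyGetD s right 0 = s[right.toNat] :=
    PySem.List.pyGetD_eq_getElem s 0 hr0 hrlen
  unfold generalLoop
  rw [dif_pos hlr, egetL, egetR]
  by_cases hsumt : s[left.toNat] + s[right.toNat] = t
  · rw [if_pos hsumt]
    have hcL : Cand s t s[left.toNat] := pair_cand s t hs hLlt hRlt (by omega) hsumt
    have h1 : m ≤ s[left.toNat] := hleast _ (List.getElem_mem hLlt) hcL
    have h2 : s[left.toNat] ≤ s[i] := pairwise_mono s hs (by omega) hi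
    have hLm : s[left.toNat] = m := by omega
    have hRm : s[right.toNat] = t - m := by omega
    rw [hLm, hRm]
  · rw [if_neg hsumt]
    by_cases hgt : s[left.toNat] + s[right.toNat] > t
    · rw [if_pos hgt]
      apply ih ((right - 1 - left).toNat) (by omega) left (right - 1) rfl h0 (by omega)
      intro i' j' hi' hj' hij' hsum'
      obtain ⟨ha, hb⟩ := hinv i' j' hi' hj' hij' hsum'
      refine ⟨ha, ?_⟩
      by_contra hbad
      push_neg at hbad
      have hj'R : j' = right.toNat := by omega
      have hlow : s[left.toNat] ≤ s[i']'(hi') := pairwise_mono s hs (by omega) hi'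
      subst hj'R
      omega
    · rw [if_neg hgt]
      apply ih ((right - (left + 1)).toNat) (by omega) (left + 1) right rfl (by omega) hrlen
      intro i' j' hi' hj' hij' hsum'
      obtain ⟨ha, hb⟩ := hinv i' j' hi' hj' hij' hsum'
      refine ⟨?_, hb⟩
      by_contra hbad
      push_neg at hbad
      have hi'L : i' = left.toNat := by omega
      have hhigh : s[j']'(hj') ≤ s[right.toNat] := pairwise_mono s hs (by omega) hRlt
      subst hi'L
      omega

theorem loop_none (s : List Int) (t : Int) (hs : List.Pairwise (· ≤ ·) s)
    (hno : ∀ x ∈ s, ¬ Cand s t x) :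
    ∀ (k : Nat) (left right : Int), (right - left).toNat = k → 0 ≤ left →
      right < (s.length : Int) → generalLoop s t left right = none := by
  intro k
  induction k using Nat.strong_induction_on with
  | _ k ih =>
  intro left right hk h0 hrlen
  unfold generalLoop
  by_cases hlr : left < right
  · rw [dif_pos hlr]
    have hr0 : (0 : Int) ≤ right := by omega
    have hLlen : left < (s.length : Int) := by omega
    have hLlt : left.toNat < s.length := by omega
    have hRlt : right.toNat < s.length := by omega
    have egetL : PySem.List.pyGetD s left 0 = s[left.toNat] :=
      PySem.List.pyGetD_eq_getElem s 0 h0 hLlen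
    have egetR : PySem.List.pyGetD s right 0 = s[right.toNat] :=
      PySem.List.pyGetD_eq_getElem s 0 hr0 hrlen
    rw [egetL, egetR]
    have hne : ¬ (s[left.toNat] + s[right.toNat] = t) := fun h =>
      hno _ (List.getElem_mem hLlt) (pair_cand s t hs hLlt hRlt (by omega) h)
    rw [if_neg hne]
    by_cases hgt : s[left.toNat] + s[right.toNat] > t
    · rw [if_pos hgt]
      exact ih ((right - 1 - left).toNat) (by omega) left (right - 1) rfl h0 (by omega)
    · rw [if_neg hgt]
      exact ih ((right - (left + 1)).toNat) (by omega) (left + 1) right rfl (by omega) hrlen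
  · rw [dif_neg hlr]

theorem general_eq_some (arr : List Int) (t m : Int) (hm : m ∈ arr) (hc : Cand arr t m)
    (hl : ∀ x ∈ arr, Cand arr t x → m ≤ x) : general arr t = some [m, t - m] := by
  unfold general
  have hperm : (PySem.List.sorted arr (fun x => x) false).Perm arr :=
    PySem.List.sorted_perm arr (fun x => x) false
  have hpair : List.Pairwise (· ≤ ·) (PySem.List.sorted arr (fun x => x) false) :=
    PySem.List.sorted_pairwise arr (fun x => x)
  apply loop_some _ t m hpair (hperm.mem_iff.mpr hm) ((cand_perm hperm t m).mpr hc)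
    (fun x hx hcx => hl x (hperm.mem_iff.mp hx) ((cand_perm hperm t x).mp hcx))
    (((PySem.List.sorted arr (fun x => x) false).length : Int) - 1 - 0).toNat 0 _ rfl le_rfl
    (by omega)
  intro i j hi hj hij hsum
  omega

theorem general_eq_none (arr : List Int) (t : Int) (hno : ∀ x ∈ arr, ¬ Cand arr t x) :
    general arr t = none := by
  unfold general
  have hperm : (PySem.List.sorted arr (fun x => x) false).Perm arr :=
    PySem.List.sorted_perm arr (fun x => x) false
  have hpair : List.Pairwise (· ≤ ·) (PySem.List.sorted arr (fun x => x) false) :=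
    PySem.List.sorted_pairwise arr (fun x => x)
  exact loop_none _ t hpair
    (fun x hx hcx => hno x (hperm.mem_iff.mp hx) ((cand_perm hperm t x).mp hcx))
    (((PySem.List.sorted arr (fun x => x) false).length : Int) - 1 - 0).toNat 0 _ rfl le_rfl
    (by omega)

-- B-side: the key scan is a running minimum over the keys satisfying the candidate test
def ominI (a b : Option Int) : Option Int :=
  match a, b with
  | none, o => o
  | some x, none => some x
  | some x, some y => some (min x y)

def candB (c : PySem.Dict Int Int) (t x : Int) : Bool :=
  decide ((c.contains (t - x) = true) ∧ (x < t - x ∨ (x = t - x ∧ 1 < c.getD x 0)))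

def minCandB (p : Int → Bool) (l : List Int) : Option Int :=
  l.foldl (fun acc x => ominI acc (if p x then some x else none)) none

theorem ominI_none_right (a : Option Int) : ominI a none = a := by
  cases a <;> rfl

theorem ominI_none_left (o : Option Int) : ominI none o = o := rfl

theorem if_bool_true {α : Type} (a b : α) : (if (true : Bool) = true then a else b) = a := rfl

theorem if_bool_false {α : Type} (a b : α) : (if (false : Bool) = true then a else b) = b := rfl

theorem ominI_assoc (a b c : Option Int) : ominI (ominI a b) c = ominI a (ominI b c) := by
  cases a <;> cases b <;> cases c <;> simp [ominI, min_assoc]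

theorem bStep_eq_omin (c : PySem.Dict Int Int) (t : Int) (b : Option Int) (x : Int) :
    bStep c t b x = ominI b (if candB c t x then some x else none) := by
  unfold bStep bUpd candB
  by_cases h : (c.contains (t - x) = true) ∧ (x < t - x ∨ (x = t - x ∧ 1 < c.getD x 0))
  · rw [if_pos h, if_pos (by simpa using h)]
    cases b with
    | none => rfl
    | some v =>
      show (if x < v then some x else some v) = some (min v x)
      rw [min_def]
      split_ifs <;> (first | rfl | omega)
  · rw [if_neg h, if_neg (by simpa using h)]
    exact (ominI_none_right b).symm

theorem foldl_omin_acc (g : Int → Option Int) (l : List Int) : ∀ b : Option Int,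
    l.foldl (fun acc x => ominI acc (g x)) b =
      ominI b (l.foldl (fun acc x => ominI acc (g x)) none) := by
  induction l with
  | nil => intro b; exact (ominI_none_right b).symm
  | cons x l ihl =>
    intro b
    show l.foldl (fun acc x => ominI acc (g x)) (ominI b (g x)) =
      ominI b (l.foldl (fun acc x => ominI acc (g x)) (ominI none (g x)))
    rw [ihl (ominI b (g x)), ihl (ominI none (g x)), ← ominI_assoc, ← ominI_assoc,
      ominI_none_right]

theorem minCandB_cons (p : Int → Bool) (x : Int) (l : List Int) :
    minCandB p (x :: l) = ominI (if p x then some x else none) (minCandB p l) := by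
  unfold minCandB
  show l.foldl _ (ominI none (if p x then some x else none)) = _
  rw [foldl_omin_acc]
  rfl

theorem minCandB_eq_none (p : Int → Bool) (l : List Int) (h : minCandB p l = none) :
    ∀ x ∈ l, p x = false := by
  induction l with
  | nil => intro x hx; cases hx
  | cons y l ihl =>
    rw [minCandB_cons] at h
    have h1 : (if p y then some y else none) = none ∧ minCandB p l = none := by
      rcases h2 : (if p y then some y else none) with _ | v <;>
        rcases h3 : minCandB p l with _ | w <;> rw [h2, h3] at h <;>
          simp [ominI] at h ⊢
    intro x hx
    rcases List.mem_cons.mp hx with rfl | hx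
    · rcases hpy : p x with _ | _
      · rfl
      · rw [hpy, if_bool_true] at h1; exact absurd h1.1 (by simp)
    · exact ihl h1.2 x hx

theorem minCandB_eq_some (p : Int → Bool) (l : List Int) (m : Int)
    (h : minCandB p l = some m) :
    m ∈ l ∧ p m = true ∧ ∀ x ∈ l, p x = true → m ≤ x := by
  induction l generalizing m with
  | nil => cases h
  | cons y l ihl =>
    rw [minCandB_cons] at h
    rcases hpy : p y with _ | _
    · rw [hpy, if_bool_false, ominI_none_left] at h
      obtain ⟨h1, h2, h3⟩ := ihl m h
      refine ⟨List.mem_cons_of_mem _ h1, h2, ?_⟩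
      intro x hx hpx
      rcases List.mem_cons.mp hx with rfl | hx
      · rw [hpx] at hpy; cases hpy
      · exact h3 x hx hpx
    · rw [hpy, if_bool_true] at h
      rcases hM : minCandB p l with _ | m'
      · rw [hM] at h
        have hm : m = y := by simpa [ominI] using h.symm
        subst hm
        refine ⟨List.mem_cons_self, hpy, ?_⟩
        intro x hx hpx
        rcases List.mem_cons.mp hx with rfl | hx
        · exact le_refl _
        · exact absurd (minCandB_eq_none p l hM x hx) (by rw [hpx]; simp)
      · rw [hM] at h
        have hm : m = min y m' := by simpa [ominI] using h.symm
        obtain ⟨h1, h2, h3⟩ := ihl m' hM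
        constructor
        · rcases min_cases y m' with ⟨he, _⟩ | ⟨he, _⟩
          · rw [hm, he]; exact List.mem_cons_self
          · rw [hm, he]; exact List.mem_cons_of_mem _ h1
        constructor
        · rcases min_cases y m' with ⟨he, _⟩ | ⟨he, _⟩
          · rw [hm, he]; exact hpy
          · rw [hm, he]; exact h2
        · intro x hx hpx
          rcases List.mem_cons.mp hx with rfl | hx
          · rw [hm]; exact min_le_left _ _
          · calc m ≤ m' := by rw [hm]; exact min_le_right _ _
              _ ≤ x := h3 x hx hpx

theorem minCandB_isSome (p : Int → Bool) (l : List Int) (x : Int) (hx : x ∈ l)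
    (hpx : p x = true) : (minCandB p l).isSome = true := by
  induction l with
  | nil => cases hx
  | cons y l ihl =>
    rw [minCandB_cons]
    rcases List.mem_cons.mp hx with rfl | hx
    · rw [hpx]
      rcases minCandB p l with _ | w <;> simp [ominI]
    · have := ihl hx
      rcases hM : minCandB p l with _ | w
      · rw [hM] at this; cases this
      · rcases (if p y then some y else none) with _ | v <;> simp [ominI]

theorem candB_iff (arr : List Int) (t x : Int) :
    candB (PySem.Dict.counter arr) t x = true ↔ Cand arr t x := by
  unfold candB Cand
  rw [decide_eq_true_eq, PySem.Dict.contains_counter, PySem.Dict.getD_counter]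
  constructor
  · rintro ⟨h1, h2⟩
    refine ⟨by simpa using h1, ?_⟩
    rcases h2 with h | ⟨he, hc⟩
    · exact Or.inl h
    · exact Or.inr ⟨he, by exact_mod_cast hc⟩
  · rintro ⟨h1, h2⟩
    refine ⟨by simpa using h1, ?_⟩
    rcases h2 with h | ⟨he, hc⟩
    · exact Or.inl h
    · exact Or.inr ⟨he, by exact_mod_cast hc⟩

theorem bfold_eq_minCandB (c : PySem.Dict Int Int) (t : Int) (l : List Int) :
    l.foldl (bStep c t) none = minCandB (candB c t) l := by
  unfold minCandB
  apply PySem.List.foldl_congr_mem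
  intro acc x _
  exact bStep_eq_omin c t acc x

theorem alt_eq_some (arr : List Int) (t m : Int) (hm : m ∈ arr) (hc : Cand arr t m)
    (hl : ∀ x ∈ arr, Cand arr t x → m ≤ x) : general_alt arr t = some [m, t - m] := by
  simp only [general_alt]
  rw [PySem.Dict.foldl_insert_getD_add_one_eq_counter, bfold_eq_minCandB,
    PySem.Dict.keys_counter]
  have hmk : m ∈ PySem.Set.ofList arr := (PySem.Set.mem_ofList arr m).mpr hm
  have hsome := minCandB_isSome (candB (PySem.Dict.counter arr) t) _ m hmk
    ((candB_iff arr t m).mpr hc)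
  rcases hM : minCandB (candB (PySem.Dict.counter arr) t) (PySem.Set.ofList arr) with _ | m'
  · rw [hM] at hsome; cases hsome
  · obtain ⟨h1, h2, h3⟩ := minCandB_eq_some _ _ _ hM
    have hm'arr : m' ∈ arr := (PySem.Set.mem_ofList arr m').mp h1
    have hcm' : Cand arr t m' := (candB_iff arr t m').mp h2
    have hle1 : m ≤ m' := hl m' hm'arr hcm'
    have hle2 : m' ≤ m := h3 m hmk ((candB_iff arr t m).mpr hc)
    have : m' = m := le_antisymm hle2 hle1
    rw [this]

theorem alt_eq_none (arr : List Int) (t : Int) (hno : ∀ x ∈ arr, ¬ Cand arr t x) :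
    general_alt arr t = none := by
  simp only [general_alt]
  rw [PySem.Dict.foldl_insert_getD_add_one_eq_counter, bfold_eq_minCandB,
    PySem.Dict.keys_counter]
  rcases hM : minCandB (candB (PySem.Dict.counter arr) t) (PySem.Set.ofList arr) with _ | m'
  · rfl
  · obtain ⟨h1, h2, _⟩ := minCandB_eq_some _ _ _ hM
    exact absurd ((candB_iff arr t m').mp h2)
      (hno m' ((PySem.Set.mem_ofList arr m').mp h1))

-- ===== VERDICT (by name: the statement is the Claim_ definition above) =====
theorem general_spec : Claim_equal_general := by
  intro arr target _
  unfold Spec_general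
  by_cases hex : ∃ x ∈ arr, Cand arr target x
  · obtain ⟨x0, hx0, hcx0⟩ := hex
    haveI : DecidablePred (Cand arr target) := Classical.decPred _
    have hne : (arr.toFinset.filter (Cand arr target)).Nonempty :=
      ⟨x0, Finset.mem_filter.mpr ⟨List.mem_toFinset.mpr hx0, hcx0⟩⟩
    obtain ⟨hm1, hm2⟩ := Finset.mem_filter.mp ((arr.toFinset.filter (Cand arr target)).min'_mem hne)
    have hl : ∀ x ∈ arr, Cand arr target x → (arr.toFinset.filter (Cand arr target)).min' hne ≤ x :=
      fun x hx hcx => Finset.min'_le _ x (Finset.mem_filter.mpr ⟨List.mem_toFinset.mpr hx, hcx⟩)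
    rw [general_eq_some arr target _ (List.mem_toFinset.mp hm1) hm2 hl,
      alt_eq_some arr target _ (List.mem_toFinset.mp hm1) hm2 hl]
  · push_neg at hex
    rw [general_eq_none arr target hex, alt_eq_none arr target hex]
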